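-- pv_equiv track=rewrite | github.com/mxavier-dev/vending-machine | vending_machine_EN.py | only_number
-- ===== SOURCE A (Python) =====
-- def only_number(char):
--     """
--     Validates if the input character is a number or a comma (for decimal values).
--     Args:
--         char (str): The character to validate.
--     Returns:
--         bool: True if the character is valid, False otherwise.
--     """
--     if char == '':
--         return True
--     if char.count(',') > 1:  # Only one comma allowed (for decimal values)
--         return False
--     if all(c in '0123456789,' for c in char):  # Check if all characters are numbers or commas
--         return True
--     return False
-- ===== SOURCE B (Python) =====
-- import re
--
-- _ONLY_NUMBER_RE = re.compile(r'[0-9]*,?[0-9]*')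
--
-- def only_number(char):
--     return _ONLY_NUMBER_RE.fullmatch(char) is not None
-- ===== Notes on version B (the rewrite author's own statement) =====
-- stated objective: idiomatic
-- what changed: Replaced A's two separate scans (comma count then per-character membership check) with a single anchored regular-expression fullmatch r'[0-9]*,?[0-9]*' compiled once.
import Mathlib
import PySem

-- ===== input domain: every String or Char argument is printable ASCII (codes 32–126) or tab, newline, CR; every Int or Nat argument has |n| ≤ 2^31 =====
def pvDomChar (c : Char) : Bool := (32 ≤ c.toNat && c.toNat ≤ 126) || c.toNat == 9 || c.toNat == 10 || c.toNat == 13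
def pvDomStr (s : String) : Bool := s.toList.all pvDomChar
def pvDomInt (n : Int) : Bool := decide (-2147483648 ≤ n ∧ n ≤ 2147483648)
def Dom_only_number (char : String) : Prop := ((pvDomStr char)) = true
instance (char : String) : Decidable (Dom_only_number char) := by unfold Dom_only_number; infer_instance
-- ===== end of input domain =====

-- B replaces A's two scans (comma count, then per-character membership) with one anchored
-- regex fullmatch of r'[0-9]*,?[0-9]*'; equal on all strings (idiomatic rewrite).

-- ===== PORT A =====
def only_number (char : String) : Bool :=
  if char = "" then true
  else if PySem.Str.count char "," > 1 then false
  else if char.toList.all (fun c => "0123456789,".toList.contains c) then true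
  else false

-- ===== PORT B =====
-- B is re.fullmatch(r'[0-9]*,?[0-9]*', char): consume the maximal digit run, then an
-- optional comma, then the maximal digit run, and require end of input (the regex is
-- deterministic, so this greedy left-to-right matching is exact).
def pvRegexTail (l : List Char) : Bool :=
  -- ',?[0-9]*' then end-of-input, after the leading '[0-9]*'
  match l with
  | [] => true
  | c :: t => c == ',' && (t.dropWhile Char.isDigit).isEmpty

def only_number_alt (char : String) : Bool :=
  pvRegexTail (char.toList.dropWhile Char.isDigit)

-- ===== PRECONDITION & SPEC =====
def Spec_only_number (char : String) (out : Bool) : Prop := out = only_number_alt char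
instance (char : String) (out : Bool) : Decidable (Spec_only_number char out) := by unfold Spec_only_number; infer_instance

-- ===== CLAIM (what is proved, stated in full; the proofs are below) =====
def Claim_equal_only_number : Prop := ∀ (char : String), Dom_only_number char → Spec_only_number char (only_number char)

-- ===== LEMMAS AND PROOFS =====

-- membership in the literal '0123456789,' is 'digit or comma'
theorem pv_mem_digits (c : Char) :
    ("0123456789,".toList.contains c) = (c.isDigit || c == ',') := by
  have hl : "0123456789,".toList = ['0','1','2','3','4','5','6','7','8','9',','] := by decide
  rw [hl, Bool.eq_iff_iff]
  simp [Char.isDigit]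
  constructor
  · rintro (rfl|rfl|rfl|rfl|rfl|rfl|rfl|rfl|rfl|rfl|rfl) <;> decide
  · rintro (⟨h1, h2⟩ | rfl)
    · have h1' : 48 ≤ c.val.toNat := UInt32.le_iff_toNat_le.mp h1
      have h2' : c.val.toNat ≤ 57 := UInt32.le_iff_toNat_le.mp h2
      have hv : ∀ (d : Char), c.val.toNat = d.val.toNat → c = d := by
        intro d h
        exact Char.ext (UInt32.toNat_inj.mp h)
      interval_cases c.val.toNat <;>
        first
        | simp [hv '0' (by decide)]
        | simp [hv '1' (by decide)]
        | simp [hv '2' (by decide)]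
        | simp [hv '3' (by decide)]
        | simp [hv '4' (by decide)]
        | simp [hv '5' (by decide)]
        | simp [hv '6' (by decide)]
        | simp [hv '7' (by decide)]
        | simp [hv '8' (by decide)]
        | simp [hv '9' (by decide)]
    · simp

-- str.count with a single-character needle is List.count
theorem pv_count_go (l : List Char) : ∀ (fuel acc : ℕ), l.length ≤ fuel →
    PySem.Chars.count.go [','] fuel l acc = acc + l.count ',' := by
  induction l with
  | nil => intro fuel acc _; cases fuel <;> simp [PySem.Chars.count.go]
  | cons c t ih =>
    intro fuel acc h
    cases fuel with
    | zero => simp at h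
    | succ f =>
      have hf : t.length ≤ f := by simpa using h
      have step : PySem.Chars.count.go [','] (f + 1) (c :: t) acc =
          if [','].isPrefixOf (c :: t) then
            PySem.Chars.count.go [','] f ((c :: t).drop 1) (acc + 1)
          else PySem.Chars.count.go [','] f t acc := rfl
      rw [step]
      have hpre : [','].isPrefixOf (c :: t) = (',' == c) := by
        simp [List.isPrefixOf]
      rw [hpre]
      by_cases hc : (',' == c) = true
      · have hce : c = ',' := (beq_iff_eq.mp hc).symm
        rw [if_pos hc, List.drop_one, List.tail_cons, ih _ _ hf]
        simp [hce]
        omega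
      · have hcb : (c == ',') = false := by
          simp only [beq_eq_false_iff_ne]
          intro h; exact hc (by simp [h])
        rw [if_neg hc, ih _ _ hf]
        simp [List.count_cons, hcb]

theorem pv_count_str (s : String) : PySem.Str.count s "," = s.toList.count ',' := by
  have h : ",".toList = [','] := by decide
  rw [PySem.Str.count, h, PySem.Chars.count]
  have hlen : s.toList.length ≤ s.length := by simp
  simp [pv_count_go s.toList s.length 0 hlen]

-- a fully-consumed digit run means every character was a digit
theorem pv_all_digit_iff (l : List Char) :
    (l.dropWhile Char.isDigit).isEmpty = l.all Char.isDigit := by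
  induction l with
  | nil => simp
  | cons c t ih =>
    by_cases h : c.isDigit <;> simp [List.dropWhile, h, ih]

-- all-digits = (all digit-or-comma and no comma)
theorem pv_digits_only (t : List Char) :
    t.all Char.isDigit = ((t.all fun c => c.isDigit || c == ',') && decide (List.count ',' t = 0)) := by
  induction t with
  | nil => simp
  | cons c t ih =>
    by_cases hc : c = ','
    · subst hc
      simp [Char.isDigit]
    · have hcb : (c == ',') = false := by simp [hc]
      simp [List.count_cons, hcb, ih]
      cases c.isDigit <;> simp

-- the regex accepts exactly 'digits and commas, at most one comma'
theorem pv_key (l : List Char) :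
    pvRegexTail (l.dropWhile Char.isDigit)
      = (l.all (fun c => c.isDigit || c == ',') && l.count ',' ≤ 1) := by
  induction l with
  | nil => simp [pvRegexTail]
  | cons c t ih =>
    by_cases hd : c.isDigit
    · have hne : c ≠ ',' := by
        intro h; subst h; simp [Char.isDigit] at hd
      simp [List.dropWhile, hd, ih, hne]
    · by_cases hc : c = ','
      · subst hc
        simp [List.dropWhile, hd, pvRegexTail, pv_all_digit_iff]
        exact pv_digits_only t
      · have hcb : (c == ',') = false := by simp [hc]
        simp [List.dropWhile, hd, pvRegexTail, hcb]

-- ===== VERDICT (by name: the statement is the Claim_ definition above) =====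
theorem only_number_spec : Claim_equal_only_number := by
  unfold Claim_equal_only_number Spec_only_number
  intro char _
  unfold only_number only_number_alt
  by_cases h0 : char = ""
  · subst h0; decide
  · rw [if_neg h0, pv_count_str, pv_key]
    by_cases hcnt : char.toList.count ',' > 1
    · have : decide (List.count ',' char.toList ≤ 1) = false := by
        simp; omega
      simp [hcnt, this]
    · have hle : char.toList.count ',' ≤ 1 := by omega
      have hall : (char.toList.all (fun c => "0123456789,".toList.contains c))
          = char.toList.all (fun c => c.isDigit || c == ',') := by
        simp only [pv_mem_digits]
      rw [if_neg hcnt, hall]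
      cases hb : char.toList.all (fun c => c.isDigit || c == ',') <;> simp [hle]
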